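-- pv_equiv track=rewrite | github.com/boring-km/coding-test-algorithm | union_find/programmers_assign_hotel_room.py | solution
-- ===== SOURCE A (Python) =====
-- def solution(k, room_number):
--     n = len(room_number)
--     answer = [0 for _ in range(n)]
--     record = dict()
--
--     # Union Find 알고리즘
--     def find_empty_room(num):
--         if not record.get(num):
--             record[num] = num + 1
--             return num
--         next_room = record[num]
--         found_room = find_empty_room(next_room)
--         record[num] = found_room
--         return found_room
--
--     for i in range(n):
--         answer[i] = find_empty_room(room_number[i])
--
--     return answer
-- ===== SOURCE B (Python) =====
-- def solution(k, room_number):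
--     # Two-phase iterative union-find: a read-only walk finds the first empty room,
--     # then a second walk over the same chain compresses every node to it.
--     record = {}
--     answer = []
--     for num in room_number:
--         # phase 1: locate the empty room without touching the dict
--         root = num
--         while record.get(root):
--             root = record[root]
--         # phase 2: re-walk the chain, pointing every visited node at root
--         cur = num
--         while record.get(cur):
--             nxt = record[cur]
--             record[cur] = root
--             cur = nxt
--         record[root] = root + 1
--         answer.append(root)
--     return answer
-- ===== Notes on version B (the rewrite author's own statement) =====
-- stated objective: alternative
-- what changed: The recursive find_empty_room (path compression performed frame by frame on the way back out of the recursion) is replaced by two iterative walks: a read-only walk that locates the empty room, then a second walk over the same chain that compresses each visited node to it; the dict truthiness test (record.get, so a stored 0 still counts as empty) and the outer loop are preserved.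
import Mathlib
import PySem

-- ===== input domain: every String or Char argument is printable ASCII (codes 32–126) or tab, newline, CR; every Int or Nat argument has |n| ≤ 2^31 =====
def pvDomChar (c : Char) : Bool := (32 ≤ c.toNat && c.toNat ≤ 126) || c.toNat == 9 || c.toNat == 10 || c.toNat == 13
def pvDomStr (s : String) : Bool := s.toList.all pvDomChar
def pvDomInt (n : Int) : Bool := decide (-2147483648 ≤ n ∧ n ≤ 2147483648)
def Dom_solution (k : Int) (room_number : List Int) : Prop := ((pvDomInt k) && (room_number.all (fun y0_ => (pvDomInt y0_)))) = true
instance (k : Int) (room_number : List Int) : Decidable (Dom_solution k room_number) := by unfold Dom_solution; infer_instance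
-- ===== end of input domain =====

-- B replaces A's recursive find_empty_room (path compression performed frame by frame on the
-- way back out of the recursion) by two iterative walks: a read-only walk that locates the
-- empty room, then a second walk over the same chain that compresses every visited node to it.
-- Both ports carry a Nat fuel for Lean termination only: chain values strictly increase, so on
-- any input the fuel (2^33 + n + 2, larger than any reachable chain length) is never exhausted.

-- ===== PORT A =====
-- find_empty_room: recursion with compression on return.  'not record.get(num)' is Python's
-- truthiness test: absent key or stored 0 both count as empty, modelled by getD _ 0 = 0.
def findRecA (fuel : Nat) (record : PySem.Dict Int Int) (num : Int) : Int × PySem.Dict Int Int :=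
  match fuel with
  | 0 => (num, record)        -- fuel exhaustion (unreachable)
  | f + 1 =>
    if record.getD num 0 = 0 then
      (num, record.insert num (num + 1))
    else
      let next_room := record.getD num 0
      let r := findRecA f record next_room
      (r.1, r.2.insert num r.1)

def solution (k : Int) (room_number : List Int) : List Int :=
  let fuel := 8589934592 + room_number.length + 2
  (room_number.foldl (fun st num =>
      let r := findRecA fuel st.2 num
      (st.1 ++ [r.1], r.2))
    (([] : List Int), (PySem.Dict.empty : PySem.Dict Int Int))).1

-- ===== PORT B =====
-- phase 1: 'root = num; while record.get(root): root = record[root]' — read-only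
def walkRoot (fuel : Nat) (record : PySem.Dict Int Int) (root : Int) : Int :=
  match fuel with
  | 0 => root                 -- fuel exhaustion (unreachable)
  | f + 1 =>
    if record.getD root 0 = 0 then root
    else walkRoot f record (record.getD root 0)

-- phase 2: 'cur = num; while record.get(cur): nxt = record[cur]; record[cur] = root; cur = nxt'
-- followed, when the loop guard fails, by 'record[root] = root + 1' (the fall-through write).
def compressPath (fuel : Nat) (record : PySem.Dict Int Int) (cur root : Int) :
    PySem.Dict Int Int :=
  match fuel with
  | 0 => record               -- fuel exhaustion (unreachable)
  | f + 1 =>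
    if record.getD cur 0 = 0 then record.insert root (root + 1)
    else
      let nxt := record.getD cur 0
      compressPath f (record.insert cur root) nxt root

def solution_alt (k : Int) (room_number : List Int) : List Int :=
  let fuel := 8589934592 + room_number.length + 2
  (room_number.foldl (fun st num =>
      let root := walkRoot fuel st.2 num
      (st.1 ++ [root], compressPath fuel st.2 num root))
    (([] : List Int), (PySem.Dict.empty : PySem.Dict Int Int))).1

-- ===== PRECONDITION & SPEC =====
def Spec_solution (k : Int) (room_number : List Int) (out : List Int) : Prop := out = solution_alt k room_number
instance (k : Int) (room_number : List Int) (out : List Int) : Decidable (Spec_solution k room_number out) := by unfold Spec_solution; infer_instance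

-- ===== CLAIM (what is proved, stated in full; the proofs are below) =====
def Claim_equal_solution : Prop := ∀ (k : Int) (room_number : List Int), Dom_solution k room_number → Spec_solution k room_number (solution k room_number)

-- ===== LEMMAS AND PROOFS =====

-- the running invariant: every stored value exceeds its key (rooms point strictly forward)
def InvD (d : PySem.Dict Int Int) : Prop := ∀ y : Int, d.contains y = true → y < d.getD y 0

-- a key with a nonzero stored value is present
lemma contains_of_getD_ne (record : PySem.Dict Int Int) (num : Int)
    (h : ¬ record.getD num 0 = 0) : record.contains num = true := by
  by_cases hc : record.contains num = true
  · exact hc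
  · exact absurd (PySem.Dict.getD_of_not_contains record 0 (by simpa using hc)) h

-- two inserts at distinct keys commute when the first key is already present
lemma insert_comm_of_contains (d : PySem.Dict Int Int) (a b va vb : Int)
    (h : d.contains a = true) (hab : a ≠ b) :
    (d.insert a va).insert b vb = (d.insert b vb).insert a va := by
  apply PySem.Dict.ext
  by_cases hb : d.contains b = true
  · simp only [PySem.Dict.items_insert, PySem.Dict.contains_insert, h, hb, if_true,
      Bool.or_true, List.map_map]
    refine List.map_congr_left ?_
    intro p _
    simp only [Function.comp]
    by_cases hpa : p.1 = a <;> by_cases hpb : p.1 = b <;> simp_all [beq_iff_eq]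
  · have hb' : d.contains b = false := by simpa using hb
    simp only [PySem.Dict.items_insert, PySem.Dict.contains_insert, h, hb', if_true,
      Bool.or_true, beq_iff_eq]
    simp [List.map_append, beq_iff_eq, Ne.symm hab]

-- the invariant survives an insert pointing forward
lemma InvD_insert (d : PySem.Dict Int Int) (k w : Int) (hkw : k < w) (h : InvD d) :
    InvD (d.insert k w) := by
  intro y hy
  rw [PySem.Dict.getD_insert]
  by_cases hyk : y = k
  · simpa [hyk] using hkw
  · rw [if_neg hyk]
    rw [PySem.Dict.contains_insert] at hy
    simp [beq_iff_eq, hyk] at hy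
    exact h y hy

-- the found room never lies before the query
lemma findRecA_ge (fuel : Nat) : ∀ (record : PySem.Dict Int Int) (num : Int), InvD record →
    num ≤ (findRecA fuel record num).1 := by
  induction fuel with
  | zero => intro record num _; exact le_refl num
  | succ f ih =>
    intro record num hInv
    unfold findRecA
    by_cases h0 : record.getD num 0 = 0
    · simp [h0]
    · simp only [h0, reduceIte]
      have hc := contains_of_getD_ne record num h0
      have hlt := hInv num hc
      exact le_of_lt (lt_of_lt_of_le hlt (ih record _ hInv))

-- the invariant survives a whole find
lemma findRecA_inv (fuel : Nat) : ∀ (record : PySem.Dict Int Int) (num : Int), InvD record →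
    InvD (findRecA fuel record num).2 := by
  induction fuel with
  | zero => intro record num h; exact h
  | succ f ih =>
    intro record num hInv
    unfold findRecA
    by_cases h0 : record.getD num 0 = 0
    · simpa [h0] using InvD_insert record num (num + 1) (by omega) hInv
    · simp only [h0, reduceIte]
      have hc := contains_of_getD_ne record num h0
      have hnum_lt : num < record.getD num 0 := hInv num hc
      have hge := findRecA_ge f record (record.getD num 0) hInv
      exact InvD_insert _ num _ (lt_of_lt_of_le hnum_lt hge) (ih record _ hInv)

-- findRecA only adds keys
lemma contains_findRecA (fuel : Nat) : ∀ (record : PySem.Dict Int Int) (num x : Int),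
    record.contains x = true → (findRecA fuel record num).2.contains x = true := by
  induction fuel with
  | zero => intro record num x h; exact h
  | succ f ih =>
    intro record num x h
    unfold findRecA
    by_cases h0 : record.getD num 0 = 0 <;>
      simp [h0, PySem.Dict.contains_insert, h, ih record _ _ h]

-- transfer: a pending insert at a key strictly before the query slides out of a find
lemma findRecA_insert (fuel : Nat) : ∀ (e : PySem.Dict Int Int) (num x v : Int), InvD e →
    e.contains x = true → x < num →
    findRecA fuel (e.insert x v) num =
      ((findRecA fuel e num).1, (findRecA fuel e num).2.insert x v) := by
  induction fuel with
  | zero => intro e num x v _ _ _; rfl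
  | succ f ih =>
    intro e num x v hInv hx hxn
    have hxe : x ≠ num := ne_of_lt hxn
    have hget : (e.insert x v).getD num 0 = e.getD num 0 := by
      rw [PySem.Dict.getD_insert, if_neg (Ne.symm hxe)]
    unfold findRecA
    by_cases h0 : e.getD num 0 = 0
    · simp only [hget, h0, reduceIte]
      exact Prod.ext rfl (insert_comm_of_contains e x num v (num + 1) hx hxe)
    · simp only [hget, h0, reduceIte]
      have hc := contains_of_getD_ne e num h0
      have hxn' : x < e.getD num 0 := lt_trans hxn (hInv num hc)
      rw [ih e _ x v hInv hx hxn']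
      refine Prod.ext rfl ?_
      exact insert_comm_of_contains _ x num v _
        (contains_findRecA f e _ x hx) hxe

-- main: the two walks together reproduce the recursion's value and dict
lemma walks_eq (fuel : Nat) : ∀ (e : PySem.Dict Int Int) (num : Int), InvD e →
    walkRoot fuel e num = (findRecA fuel e num).1 ∧
    compressPath fuel e num (findRecA fuel e num).1 = (findRecA fuel e num).2 := by
  induction fuel with
  | zero => intro e num _; exact ⟨rfl, rfl⟩
  | succ f ih =>
    intro e num hInv
    unfold walkRoot compressPath findRecA
    by_cases h0 : e.getD num 0 = 0
    · simp [h0]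
    · simp only [h0, reduceIte]
      have hc := contains_of_getD_ne e num h0
      have hnum_lt : num < e.getD num 0 := hInv num hc
      obtain ⟨hv, _⟩ := ih e (e.getD num 0) hInv
      set v := (findRecA f e (e.getD num 0)).1 with hvdef
      have hnv : num < v := lt_of_lt_of_le hnum_lt (findRecA_ge f e _ hInv)
      refine ⟨hv, ?_⟩
      have hInv' : InvD (e.insert num v) := InvD_insert e num v hnv hInv
      obtain ⟨_, hcomp'⟩ := ih (e.insert num v) (e.getD num 0) hInv'
      have htr := findRecA_insert f e (e.getD num 0) num v hInv hc hnum_lt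
      rw [htr] at hcomp'
      simpa using hcomp'

-- the whole fold: thread the invariant through the outer loop
lemma fold_eq (fuel : Nat) : ∀ (l : List Int) (acc : List Int) (d : PySem.Dict Int Int),
    InvD d →
    l.foldl (fun st num =>
        let r := findRecA fuel st.2 num
        (st.1 ++ [r.1], r.2)) (acc, d)
    = l.foldl (fun st num =>
        let root := walkRoot fuel st.2 num
        (st.1 ++ [root], compressPath fuel st.2 num root)) (acc, d) := by
  intro l
  induction l with
  | nil => intro acc d _; rfl
  | cons num l ih =>
    intro acc d hInv
    obtain ⟨hv, hcomp⟩ := walks_eq fuel d num hInv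
    simp only [List.foldl_cons]
    rw [show (let root := walkRoot fuel d num;
          (acc ++ [root], compressPath fuel d num root))
        = (acc ++ [(findRecA fuel d num).1], (findRecA fuel d num).2) by
      simp only [hv, hcomp]]
    exact ih _ _ (findRecA_inv fuel d num hInv)

lemma InvD_empty : InvD (PySem.Dict.empty : PySem.Dict Int Int) := by
  intro y hy
  simp [PySem.Dict.contains_empty] at hy

-- ===== VERDICT (by name: the statement is the Claim_ definition above) =====
theorem solution_spec : Claim_equal_solution := by
  intro k room_number _
  unfold Spec_solution solution solution_alt
  exact congrArg Prod.fst
    (fold_eq (8589934592 + room_number.length + 2) room_number [] _ InvD_empty)
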